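-- pv_equiv track=rewrite | github.com/chara-louk/Information-Retrieval-project | ir2.py | or_operation
-- ===== SOURCE A (Python) =====
-- def or_operation(post_list1, post_list2):
--     result = set()
--     l_index = 0
--     r_index = 0
--
--     while l_index < len(post_list1) and r_index < len(post_list2):
--         l_item = post_list1[l_index]
--         r_item = post_list2[r_index]
--
--         if l_item == r_item:
--             result.add(l_item)
--             l_index += 1
--             r_index += 1
--
--         elif l_item > r_item:
--             result.add(r_item)
--             r_index += 1
--
--         else:
--             result.add(l_item)
--             l_index += 1
--
--     while l_index < len(post_list1):
--         result.add(post_list1[l_index])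
--         l_index += 1
--     while r_index < len(post_list2):
--         result.add(post_list2[r_index])
--         r_index += 1
--
--     return sorted(result)
-- ===== SOURCE B (Python) =====
-- def or_operation(post_list1, post_list2):
--     return sorted(set(post_list1) | set(post_list2))
-- ===== Notes on version B (the rewrite author's own statement) =====
-- stated objective: simpler
-- what changed: Replaces the two-pointer merge loop with index tracking and two tail loops by a single set-union of both lists followed by one sort; correct because A adds every element of both lists to its set regardless of order.
import Mathlib
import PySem

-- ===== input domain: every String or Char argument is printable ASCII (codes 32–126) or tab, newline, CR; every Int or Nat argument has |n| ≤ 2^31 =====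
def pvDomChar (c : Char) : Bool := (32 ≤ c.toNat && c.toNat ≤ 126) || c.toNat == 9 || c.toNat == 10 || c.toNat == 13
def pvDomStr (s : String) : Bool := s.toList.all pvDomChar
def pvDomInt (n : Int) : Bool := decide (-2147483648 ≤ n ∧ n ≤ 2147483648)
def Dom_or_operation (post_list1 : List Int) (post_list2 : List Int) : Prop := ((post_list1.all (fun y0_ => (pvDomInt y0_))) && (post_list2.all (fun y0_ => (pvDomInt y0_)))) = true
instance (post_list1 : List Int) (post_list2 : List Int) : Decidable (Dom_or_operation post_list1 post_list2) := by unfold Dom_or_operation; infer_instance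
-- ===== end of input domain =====

-- B replaces A's two-pointer merge loop (with two tail loops) by set-union-then-sort; objective: simpler.


-- ===== PORT A =====
-- A's main while-loop over l_index/r_index, transcribed as recursion on the two list suffixes;
-- the two tail while-loops are the two Set.update calls in the base case.
def orLoop : List Int → List Int → PySem.Set Int → PySem.Set Int
  | l :: ls, r :: rs, acc =>
      if l = r then orLoop ls rs (PySem.Set.add acc l)
      else if l > r then orLoop (l :: ls) rs (PySem.Set.add acc r)
      else orLoop ls (r :: rs) (PySem.Set.add acc l)
  | ls, rs, acc => PySem.Set.update (PySem.Set.update acc ls) rs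
  termination_by ls rs _ => ls.length + rs.length
  decreasing_by all_goals simp <;> omega

def or_operation (post_list1 : List Int) (post_list2 : List Int) : List Int :=
  PySem.List.sorted (orLoop post_list1 post_list2 PySem.Set.empty) (fun x => x) false

-- ===== PORT B =====
def or_operation_alt (post_list1 : List Int) (post_list2 : List Int) : List Int :=
  PySem.List.sorted (PySem.Set.union (PySem.Set.ofList post_list1) (PySem.Set.ofList post_list2)) (fun x => x) false

-- ===== PRECONDITION & SPEC =====
def Spec_or_operation (post_list1 : List Int) (post_list2 : List Int) (out : List Int) : Prop := out = or_operation_alt post_list1 post_list2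
instance (post_list1 : List Int) (post_list2 : List Int) (out : List Int) : Decidable (Spec_or_operation post_list1 post_list2 out) := by unfold Spec_or_operation; infer_instance

-- ===== CLAIM (what is proved, stated in full; the proofs are below) =====
def Claim_equal_or_operation : Prop := ∀ (post_list1 : List Int) (post_list2 : List Int), Dom_or_operation post_list1 post_list2 → Spec_or_operation post_list1 post_list2 (or_operation post_list1 post_list2)

-- ===== LEMMAS AND PROOFS =====
theorem mem_orLoop (ls rs : List Int) (acc : PySem.Set Int) (y : Int) :
    y ∈ orLoop ls rs acc ↔ y ∈ acc ∨ y ∈ ls ∨ y ∈ rs := by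
  fun_induction orLoop ls rs acc <;>
    simp_all [PySem.Set.mem_add, PySem.Set.mem_update] <;> tauto

theorem nodup_orLoop (ls rs : List Int) (acc : PySem.Set Int) (h : acc.Nodup) :
    (orLoop ls rs acc).Nodup := by
  fun_induction orLoop ls rs acc with
  | case4 => exact PySem.Set.nodup_update _ _ (PySem.Set.nodup_update _ _ h)
  | _ => rename_i ih; exact ih (PySem.Set.nodup_add _ _ h)

-- ===== VERDICT (by name: the statement is the Claim_ definition above) =====
theorem or_operation_spec : Claim_equal_or_operation := by
  intro l1 l2 _
  unfold Spec_or_operation or_operation or_operation_alt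
  rw [PySem.List.sorted_id_eq_sorted_id_iff_perm]
  apply (List.perm_ext_iff_of_nodup (nodup_orLoop _ _ _ List.nodup_nil) _).mpr
  · intro y
    rw [mem_orLoop, PySem.Set.mem_union, PySem.Set.mem_ofList, PySem.Set.mem_ofList]
    simp
  · exact PySem.Set.nodup_union _ _ (PySem.Set.nodup_ofList _)
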